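-- pv_equiv track=rewrite | github.com/MrBrantCode/unitest_baseline | mut_generate/mist_train_cf/cf_103569/solution.py | sort_list_items
-- ===== SOURCE A (Python) =====
-- def sort_list_items(list_items, given_number):
--     """
--     Returns a new list containing items from list_items with the number of digits
--     less than or equal to given_number, in ascending order.
--
--     Args:
--     list_items (list): A list of integers.
--     given_number (int): The maximum number of digits.
--
--     Returns:
--     list: A new list containing items from list_items with the number of digits
--     less than or equal to given_number, in ascending order.
--     """
--     sorted_list = []
--     for item in list_items:
--         if len(str(item)) <= given_number:
--             sorted_list.append(item)
--     for i in range(len(sorted_list)-1):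
--         for j in range(i+1, len(sorted_list)):
--             if sorted_list[i] > sorted_list[j]:
--                 sorted_list[i], sorted_list[j] = sorted_list[j], sorted_list[i]
--     return sorted_list
-- ===== SOURCE B (Python) =====
-- def sort_list_items(list_items, given_number):
--     result = []
--     for item in list_items:
--         if len(str(item)) <= given_number:
--             pos = 0
--             while pos < len(result) and result[pos] <= item:
--                 pos += 1
--             result.insert(pos, item)
--     return result
-- ===== Notes on version B (the rewrite author's own statement) =====
-- stated objective: faster
-- what changed: B makes a single pass over list_items, inserting each item whose decimal representation fits given_number directly at its ascending position (insertion sort fused with the filter), instead of A's collect-then-sort with nested index loops that compare-and-swap every pair.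
import Mathlib
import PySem

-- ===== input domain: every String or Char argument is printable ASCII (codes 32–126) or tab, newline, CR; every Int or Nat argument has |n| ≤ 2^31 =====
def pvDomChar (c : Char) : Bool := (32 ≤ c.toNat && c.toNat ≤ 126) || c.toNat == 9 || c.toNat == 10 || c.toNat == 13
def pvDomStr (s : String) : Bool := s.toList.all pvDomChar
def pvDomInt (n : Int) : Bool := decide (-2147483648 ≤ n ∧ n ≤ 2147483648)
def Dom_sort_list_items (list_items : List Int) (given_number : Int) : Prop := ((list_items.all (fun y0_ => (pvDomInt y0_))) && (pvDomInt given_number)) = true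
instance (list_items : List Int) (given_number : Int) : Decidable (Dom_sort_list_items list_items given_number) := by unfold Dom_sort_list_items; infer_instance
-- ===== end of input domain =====

-- B fuses the filter with an insertion sort (one pass inserting each kept item at its
-- ascending position) instead of A's collect-then-swap-sort; measurably faster by a constant factor.

-- ===== PORT A =====
-- compare-and-swap of positions i and j (Python: sorted_list[i], sorted_list[j] = swap);
-- the ranges below only ever produce in-bounds indices, so getD matches Python indexing exactly
def pvSwapStep (l : List Int) (i j : Nat) : List Int :=
  if l.getD i 0 > l.getD j 0 then (l.set i (l.getD j 0)).set j (l.getD i 0) else l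

def sort_list_items (list_items : List Int) (given_number : Int) : List Int :=
  let sorted_list := list_items.foldl
    (fun acc item => if decide (PySem.Str.len (PySem.Int.toStr item) ≤ given_number) then acc ++ [item] else acc) []
  (List.range (sorted_list.length - 1)).foldl
    (fun acc i => (List.range' (i + 1) (sorted_list.length - (i + 1))).foldl
      (fun acc2 j => pvSwapStep acc2 i j) acc)
    sorted_list

-- ===== PORT B =====
-- transcription of B's while-loop + list.insert: skip the prefix of elements ≤ item, insert there
def pvInsertAsc (item : Int) : List Int → List Int
  | [] => [item]
  | x :: xs => if x ≤ item then x :: pvInsertAsc item xs else item :: x :: xs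

def sort_list_items_alt (list_items : List Int) (given_number : Int) : List Int :=
  list_items.foldl
    (fun result item =>
      if decide (PySem.Str.len (PySem.Int.toStr item) ≤ given_number) then pvInsertAsc item result else result)
    []

-- ===== PRECONDITION & SPEC =====
def Spec_sort_list_items (list_items : List Int) (given_number : Int) (out : List Int) : Prop := out = sort_list_items_alt list_items given_number
instance (list_items : List Int) (given_number : Int) (out : List Int) : Decidable (Spec_sort_list_items list_items given_number out) := by unfold Spec_sort_list_items; infer_instance

-- ===== CLAIM (what is proved, stated in full; the proofs are below) =====
def Claim_equal_sort_list_items : Prop := ∀ (list_items : List Int) (given_number : Int), Dom_sort_list_items list_items given_number → Spec_sort_list_items list_items given_number (sort_list_items list_items given_number)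

-- ===== LEMMAS AND PROOFS =====

-- One inner pass of A's swap sort, as a structural recursion: carry the current value of
-- position i through the suffix, swapping whenever it exceeds the element met.
def pvPass : Int → List Int → Int × List Int
  | a, [] => (a, [])
  | a, x :: xs =>
    if a > x then
      let p := pvPass x xs; (p.1, a :: p.2)
    else
      let p := pvPass a xs; (p.1, x :: p.2)

theorem pvPass_len (a : Int) (xs : List Int) : (pvPass a xs).2.length = xs.length := by
  induction xs generalizing a with
  | nil => simp [pvPass]
  | cons x xs ih => simp only [pvPass]; split_ifs <;> simp [ih]

-- A's whole double loop, structurally: fix the minimum, recurse on the rest.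
def pvSsel : List Int → List Int
  | [] => []
  | a :: xs => (pvPass a xs).1 :: pvSsel (pvPass a xs).2
termination_by l => l.length
decreasing_by simp [pvPass_len]

theorem pvInner_eq (m : Nat) : ∀ (l : List Int) (i j0 : Nat), i < j0 → j0 + m = l.length →
    (List.range' j0 m).foldl (fun acc j => pvSwapStep acc i j) l
    = (l.set i (pvPass (l.getD i 0) (l.drop j0)).1).take j0 ++ (pvPass (l.getD i 0) (l.drop j0)).2 := by
  induction m with
  | zero =>
    intro l i j0 hij hlen
    have hi : i < l.length := by omega
    rw [List.range'_zero, List.foldl_nil,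
      List.drop_of_length_le (by omega : l.length ≤ j0), List.getD_eq_getElem l 0 hi]
    show l = (l.set i (pvPass l[i] []).1).take j0 ++ (pvPass l[i] []).2
    rw [show pvPass l[i] [] = (l[i], []) from rfl, List.set_getElem_self hi,
      List.take_of_length_le (by omega : l.length ≤ j0), List.append_nil]
  | succ m ih =>
    intro l i j0 hij hlen
    have hj0 : j0 < l.length := by omega
    have hi : i < l.length := by omega
    have hdrop : l.drop j0 = l[j0] :: l.drop (j0 + 1) := List.drop_eq_getElem_cons hj0
    have hgD : l.getD i 0 = l[i] := List.getD_eq_getElem l 0 hi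
    have hxD : l.getD j0 0 = l[j0] := List.getD_eq_getElem l 0 hj0
    rw [List.range'_succ, List.foldl_cons]
    by_cases hgt : l.getD i 0 > l.getD j0 0
    · -- swap happens
      have hswap : pvSwapStep l i j0 = (l.set i l[j0]).set j0 l[i] := by
        unfold pvSwapStep; rw [if_pos hgt, hgD, hxD]
      set l' := (l.set i l[j0]).set j0 l[i] with hl'
      have hlen' : j0 + 1 + m = l'.length := by simp [hl']; omega
      have hl'i : l'.getD i 0 = l[j0] := by
        rw [hl', List.getD_eq_getElem?_getD, List.getElem?_set_ne (by omega : j0 ≠ i),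
          List.getElem?_set_self hi]
        rfl
      have hl'drop : l'.drop (j0 + 1) = l.drop (j0 + 1) := by
        rw [hl', List.drop_set_of_lt (by omega : j0 < j0 + 1),
          List.drop_set_of_lt (by omega : i < j0 + 1)]
      rw [hswap, ih l' i (j0 + 1) (by omega) hlen', hl'i, hl'drop]
      have hgt' : l[i] > l[j0] := by rw [hgD, hxD] at hgt; exact hgt
      have hpass : pvPass (l.getD i 0) (l.drop j0) =
          ((pvPass l[j0] (l.drop (j0 + 1))).1, l[i] :: (pvPass l[j0] (l.drop (j0 + 1))).2) := by
        rw [hgD, hdrop]; simp [pvPass, hgt']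
      rw [hpass]
      set q := pvPass l[j0] (l.drop (j0 + 1)) with hq
      have hsets : l'.set i q.1 = (l.set i q.1).set j0 l[i] := by
        rw [hl', List.set_comm l[i] q.1 (by omega : j0 ≠ i), List.set_set]
      rw [hsets, List.take_add_one, List.getElem?_set_self (by simp [hj0] : j0 < (l.set i q.1).length),
        List.take_set, List.set_eq_of_length_le (by simp [List.length_take] : (List.take j0 (l.set i q.1)).length ≤ j0)]
      simp
    · -- no swap
      have hswap : pvSwapStep l i j0 = l := by unfold pvSwapStep; exact if_neg hgt
      rw [hswap, ih l i (j0 + 1) (by omega) (by omega), hgD]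
      have hgt' : ¬ l[i] > l[j0] := by rw [hgD, hxD] at hgt; exact hgt
      have hpass : pvPass l[i] (l.drop j0) =
          ((pvPass l[i] (l.drop (j0 + 1))).1,
            l[j0] :: (pvPass l[i] (l.drop (j0 + 1))).2) := by
        rw [hdrop]; simp [pvPass, hgt']
      rw [hpass]
      set q := pvPass l[i] (l.drop (j0 + 1)) with hq
      rw [List.take_add_one, List.getElem?_set_ne (by omega : i ≠ j0),
        List.getElem?_eq_getElem hj0]
      simp

theorem pvOuter_eq (n m : Nat) : ∀ (pre rest : List Int), rest.length = m + 1 →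
    pre.length + (m + 1) = n →
    (List.range' pre.length m).foldl
      (fun acc i => (List.range' (i + 1) (n - (i + 1))).foldl (fun acc2 j => pvSwapStep acc2 i j) acc)
      (pre ++ rest)
    = pre ++ pvSsel rest := by
  induction m with
  | zero =>
    intro pre rest hrest _
    match rest, hrest with
    | [r], _ => simp [pvSsel, pvPass]
  | succ m ih =>
    intro pre rest hrest hn
    match rest, hrest with
    | a :: xs, hrest =>
      have hxs : xs.length = m + 1 := by simpa using hrest
      rw [List.range'_succ, List.foldl_cons]
      have hlen : (pre ++ a :: xs).length = n := by simp; omega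
      have hinner := pvInner_eq (n - (pre.length + 1)) (pre ++ a :: xs) pre.length (pre.length + 1)
        (by omega) (by omega)
      have hgD : (pre ++ a :: xs).getD pre.length 0 = a := by
        rw [List.getD_eq_getElem _ 0 (by simp)]
        simp
      have hdrop : (pre ++ a :: xs).drop (pre.length + 1) = xs := by
        rw [List.drop_length_add_append]; simp
      rw [hinner, hgD, hdrop]
      set p := pvPass a xs with hp
      have hset : (pre ++ a :: xs).set pre.length p.1 = pre ++ p.1 :: xs := by
        simp
      have htake : (pre ++ p.1 :: xs).take (pre.length + 1) = pre ++ [p.1] := by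
        rw [List.take_length_add_append]; simp
      rw [hset, htake]
      have := ih (pre ++ [p.1]) p.2 (by rw [pvPass_len]; omega) (by simp; omega)
      simp only [List.length_append, List.length_cons, List.length_nil] at this ⊢
      rw [List.append_assoc] at this
      simpa [pvSsel, List.append_assoc] using this

-- ----- A's algorithm equals pvSsel of the filtered list -----

theorem pvA_eq (list_items : List Int) (given_number : Int) :
    sort_list_items list_items given_number
    = pvSsel (list_items.filter
        (fun item => decide (PySem.Str.len (PySem.Int.toStr item) ≤ given_number))) := by
  unfold sort_list_items
  rw [PySem.List.foldl_append_if_eq_filter]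
  simp only [List.nil_append]
  set f := list_items.filter
    (fun item => decide (PySem.Str.len (PySem.Int.toStr item) ≤ given_number)) with hf
  match hfe : f with
  | [] => simp [pvSsel]
  | r :: rs =>
    have : (r :: rs).length - 1 = rs.length := by simp
    rw [this, List.range_eq_range']
    have := pvOuter_eq (r :: rs).length rs.length [] (r :: rs) rfl (by simp)
    simpa using this

-- ----- permutation and sortedness facts -----

theorem pvPass_fst_le (a : Int) (xs : List Int) : (pvPass a xs).1 ≤ a := by
  induction xs generalizing a with
  | nil => simp [pvPass]
  | cons x xs ih =>
    simp only [pvPass]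
    split_ifs with h
    · exact le_trans (ih x) (by omega)
    · exact ih a

theorem pvPass_min (a : Int) (xs : List Int) : ∀ y ∈ (pvPass a xs).2, (pvPass a xs).1 ≤ y := by
  induction xs generalizing a with
  | nil => simp [pvPass]
  | cons x xs ih =>
    simp only [pvPass]
    split_ifs with h
    · intro y hy
      rcases List.mem_cons.mp hy with rfl | hy
      · exact le_trans (pvPass_fst_le x xs) (by omega)
      · exact ih x y hy
    · intro y hy
      rcases List.mem_cons.mp hy with rfl | hy
      · exact le_trans (pvPass_fst_le a xs) (by omega)
      · exact ih a y hy

theorem pvPass_perm (a : Int) (xs : List Int) :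
    List.Perm ((pvPass a xs).1 :: (pvPass a xs).2) (a :: xs) := by
  induction xs generalizing a with
  | nil => simp [pvPass]
  | cons x xs ih =>
    simp only [pvPass]
    split_ifs with h
    · exact (List.Perm.swap a _ _).trans (List.Perm.cons a (ih x))
    · exact ((List.Perm.swap x _ _).trans (List.Perm.cons x (ih a))).trans (List.Perm.swap a x xs)

theorem pvSsel_perm (l : List Int) : List.Perm (pvSsel l) l := by
  induction l using pvSsel.induct with
  | case1 => simp [pvSsel]
  | case2 a xs ih =>
    rw [pvSsel]
    exact (List.Perm.cons _ ih).trans (pvPass_perm a xs)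

theorem pvSsel_sorted (l : List Int) : List.Pairwise (· ≤ ·) (pvSsel l) := by
  induction l using pvSsel.induct with
  | case1 => simp [pvSsel]
  | case2 a xs ih =>
    rw [pvSsel]
    refine List.Pairwise.cons ?_ ih
    intro y hy
    exact pvPass_min a xs y ((pvSsel_perm _).mem_iff.mp hy)

theorem pvInsertAsc_perm (a : Int) (l : List Int) :
    List.Perm (pvInsertAsc a l) (a :: l) := by
  induction l with
  | nil => simp [pvInsertAsc]
  | cons x xs ih =>
    simp only [pvInsertAsc]
    split_ifs with h
    · exact (List.Perm.cons x ih).trans (List.Perm.swap a x xs)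
    · exact List.Perm.refl _

theorem pvInsertAsc_sorted (a : Int) (l : List Int) (hs : List.Pairwise (· ≤ ·) l) :
    List.Pairwise (· ≤ ·) (pvInsertAsc a l) := by
  induction l with
  | nil => simp [pvInsertAsc]
  | cons x xs ih =>
    rcases List.pairwise_cons.mp hs with ⟨hx, hxs⟩
    simp only [pvInsertAsc]
    split_ifs with h
    · refine List.Pairwise.cons ?_ (ih hxs)
      intro y hy
      rcases (pvInsertAsc_perm a xs).mem_iff.mp hy with hy'
      rcases List.mem_cons.mp hy' with rfl | hy''
      · exact h
      · exact hx y hy''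
    · refine List.Pairwise.cons ?_ hs
      intro y hy
      rcases List.mem_cons.mp hy with rfl | hy'
      · omega
      · exact le_trans (by omega) (hx y hy')

theorem pvFoldlIns_perm (l : List Int) : ∀ r : List Int,
    List.Perm (l.foldl (fun res item => pvInsertAsc item res) r) (l ++ r) := by
  induction l with
  | nil => intro r; simp
  | cons a xs ih =>
    intro r
    rw [List.foldl_cons]
    exact (ih (pvInsertAsc a r)).trans
      ((List.Perm.append_left xs (pvInsertAsc_perm a r)).trans List.perm_middle)

theorem pvFoldlIns_sorted (l : List Int) : ∀ r : List Int, List.Pairwise (· ≤ ·) r →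
    List.Pairwise (· ≤ ·) (l.foldl (fun res item => pvInsertAsc item res) r) := by
  induction l with
  | nil => intro r hr; simpa using hr
  | cons a xs ih =>
    intro r hr
    rw [List.foldl_cons]
    exact ih _ (pvInsertAsc_sorted a r hr)

theorem pvB_eq (list_items : List Int) (given_number : Int) :
    sort_list_items_alt list_items given_number
    = (list_items.filter
        (fun item => decide (PySem.Str.len (PySem.Int.toStr item) ≤ given_number))).foldl
        (fun res item => pvInsertAsc item res) [] := by
  unfold sort_list_items_alt
  rw [List.foldl_filter]

-- ===== VERDICT (by name: the statement is the Claim_ definition above) =====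
theorem sort_list_items_spec : Claim_equal_sort_list_items := by
  intro list_items given_number _hdom
  unfold Spec_sort_list_items
  set f := list_items.filter
    (fun item => decide (PySem.Str.len (PySem.Int.toStr item) ≤ given_number)) with hf
  rw [pvA_eq, pvB_eq, ← hf]
  refine PySem.List.eq_of_perm_of_pairwise_le ?_ (pvSsel_sorted f) (pvFoldlIns_sorted f [] (by simp))
  exact (pvSsel_perm f).trans (by simpa using (pvFoldlIns_perm f []).symm)
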